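-- pv_equiv track=rewrite | github.com/st-ep/SetONet | Plotting/paper_plot_utils.py | infer_setonet_branch_head_type
-- ===== SOURCE A (Python) =====
-- def infer_setonet_branch_head_type(state_dict: dict) -> str:
--     if any(k.startswith("adaptive_quadrature_head.") for k in state_dict):
--         return "adaptive_quadrature"
--     if any(k.startswith("quadrature_head.") for k in state_dict):
--         return "quadrature"
--     if any(k.startswith("galerkin_head.") for k in state_dict):
--         return "galerkin_pou"
--     if any(k.startswith("pg_head.") for k in state_dict):
--         return "petrov_attention"
--     return "standard"
-- ===== SOURCE B (Python) =====
-- def infer_setonet_branch_head_type(state_dict: dict) -> str: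
--     # one pass collecting which head prefixes occur, then a fixed priority decision
--     prefixes = {
--         "adaptive_quadrature_head.": "adaptive_quadrature",
--         "quadrature_head.": "quadrature",
--         "galerkin_head.": "galerkin_pou",
--         "pg_head.": "petrov_attention",
--     }
--     seen = set()
--     for k in state_dict:
--         for p, label in prefixes.items():
--             if k.startswith(p):
--                 seen.add(label)
--     for label in ("adaptive_quadrature", "quadrature", "galerkin_pou", "petrov_attention"):
--         if label in seen:
--             return label
--     return "standard"
-- ===== Notes on version B (the rewrite author's own statement) =====
-- stated objective: alternative
-- what changed: Replaces four separate short-circuiting any() scans over the keys by a single collecting pass that records which head prefixes occur, followed by a fixed priority decision over the collected set.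
import Mathlib
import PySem

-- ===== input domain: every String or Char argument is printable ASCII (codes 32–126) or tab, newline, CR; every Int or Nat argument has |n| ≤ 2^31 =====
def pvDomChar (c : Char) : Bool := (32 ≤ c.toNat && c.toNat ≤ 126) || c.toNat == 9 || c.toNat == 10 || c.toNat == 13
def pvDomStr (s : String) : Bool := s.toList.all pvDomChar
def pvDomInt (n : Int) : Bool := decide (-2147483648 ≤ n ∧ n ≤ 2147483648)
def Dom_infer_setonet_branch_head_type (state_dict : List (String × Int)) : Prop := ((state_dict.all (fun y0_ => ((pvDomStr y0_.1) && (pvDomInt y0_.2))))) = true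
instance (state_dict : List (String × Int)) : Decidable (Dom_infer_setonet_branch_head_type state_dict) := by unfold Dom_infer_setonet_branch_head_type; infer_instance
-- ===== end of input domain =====

-- B replaces A's four separate short-circuiting any() scans by one collecting pass over the
-- keys recording which head labels occur in a set, then a fixed priority decision (objective: alternative).


-- ===== PORT A =====
def infer_setonet_branch_head_type (state_dict : List (String × Int)) : String :=
  if state_dict.any (fun kv => PySem.Str.startswith kv.1 "adaptive_quadrature_head.") then
    "adaptive_quadrature"
  else if state_dict.any (fun kv => PySem.Str.startswith kv.1 "quadrature_head.") then
    "quadrature"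
  else if state_dict.any (fun kv => PySem.Str.startswith kv.1 "galerkin_head.") then
    "galerkin_pou"
  else if state_dict.any (fun kv => PySem.Str.startswith kv.1 "pg_head.") then
    "petrov_attention"
  else
    "standard"

-- ===== PORT B =====
-- the prefixes dict of Source B (insertion order)
def pvPrefixes : List (String × String) :=
  [("adaptive_quadrature_head.", "adaptive_quadrature"),
   ("quadrature_head.", "quadrature"),
   ("galerkin_head.", "galerkin_pou"),
   ("pg_head.", "petrov_attention")]

-- body of Source B's outer loop: for each (p, label) in prefixes, add label to seen if k startswith p
def pvStep (seen : PySem.Set String) (k : String) : PySem.Set String :=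
  pvPrefixes.foldl (fun seen pl =>
    if PySem.Str.startswith k pl.1 then PySem.Set.add seen pl.2 else seen) seen

def infer_setonet_branch_head_type_alt (state_dict : List (String × Int)) : String :=
  let seen : PySem.Set String :=
    state_dict.foldl (fun seen kv => pvStep seen kv.1) PySem.Set.empty
  if PySem.Set.contains seen "adaptive_quadrature" then "adaptive_quadrature"
  else if PySem.Set.contains seen "quadrature" then "quadrature"
  else if PySem.Set.contains seen "galerkin_pou" then "galerkin_pou"
  else if PySem.Set.contains seen "petrov_attention" then "petrov_attention"
  else "standard"

-- ===== PRECONDITION & SPEC =====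
def Spec_infer_setonet_branch_head_type (state_dict : List (String × Int)) (out : String) : Prop := out = infer_setonet_branch_head_type_alt state_dict
instance (state_dict : List (String × Int)) (out : String) : Decidable (Spec_infer_setonet_branch_head_type state_dict out) := by unfold Spec_infer_setonet_branch_head_type; infer_instance

-- ===== CLAIM (what is proved, stated in full; the proofs are below) =====
def Claim_equal_infer_setonet_branch_head_type : Prop := ∀ (state_dict : List (String × Int)), Dom_infer_setonet_branch_head_type state_dict → Spec_infer_setonet_branch_head_type state_dict (infer_setonet_branch_head_type state_dict)

-- ===== LEMMAS AND PROOFS =====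

-- membership in the result of one step: the step adds exactly the labels whose prefix matches k
theorem mem_pvStep (seen : PySem.Set String) (k y : String) :
    y ∈ pvStep seen k ↔ y ∈ seen ∨ ∃ pl ∈ pvPrefixes, y = pl.2 ∧ PySem.Str.startswith k pl.1 = true := by
  simp only [pvStep, pvPrefixes, List.foldl]
  split_ifs <;> simp_all [PySem.Set.mem_add] <;> tauto

-- membership in the collected set after the whole pass
theorem mem_seen (state_dict : List (String × Int)) (y : String) :
    y ∈ state_dict.foldl (fun seen kv => pvStep seen kv.1) PySem.Set.empty ↔
      ∃ kv ∈ state_dict, ∃ pl ∈ pvPrefixes, y = pl.2 ∧ PySem.Str.startswith kv.1 pl.1 = true := by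
  suffices h : ∀ (s : PySem.Set String),
      y ∈ state_dict.foldl (fun seen kv => pvStep seen kv.1) s ↔
        y ∈ s ∨ ∃ kv ∈ state_dict, ∃ pl ∈ pvPrefixes, y = pl.2 ∧ PySem.Str.startswith kv.1 pl.1 = true by
    simpa [PySem.Set.empty] using h PySem.Set.empty
  induction state_dict with
  | nil => simp
  | cons kv tl ih =>
      intro s
      simp only [List.foldl_cons, ih, mem_pvStep, List.mem_cons]
      constructor
      · rintro ((h | ⟨pl, hpl, rfl, hsw⟩) | ⟨kv', hkv', pl, hpl, rfl, hsw⟩)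
        · exact Or.inl h
        · exact Or.inr ⟨kv, Or.inl rfl, pl, hpl, rfl, hsw⟩
        · exact Or.inr ⟨kv', Or.inr hkv', pl, hpl, rfl, hsw⟩
      · rintro (h | ⟨kv', hkv' | hkv', pl, hpl, rfl, hsw⟩)
        · exact Or.inl (Or.inl h)
        · subst hkv'; exact Or.inl (Or.inr ⟨pl, hpl, rfl, hsw⟩)
        · exact Or.inr ⟨kv', hkv', pl, hpl, rfl, hsw⟩

-- for a concrete label, membership reduces to A's any-scan with the matching prefix
theorem contains_seen_eq_any (state_dict : List (String × Int)) (p lab : String)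
    (hmem : (p, lab) ∈ pvPrefixes)
    (huniq : ∀ pl ∈ pvPrefixes, pl.2 = lab → pl.1 = p) :
    PySem.Set.contains (state_dict.foldl (fun seen kv => pvStep seen kv.1) PySem.Set.empty) lab =
      state_dict.any (fun kv => PySem.Str.startswith kv.1 p) := by
  rw [Bool.eq_iff_iff, PySem.Set.contains_iff, mem_seen, List.any_eq_true]
  constructor
  · rintro ⟨kv, hkv, pl, hpl, rfl, hsw⟩
    exact ⟨kv, hkv, by rw [huniq pl hpl rfl] at hsw; exact hsw⟩
  · rintro ⟨kv, hkv, hsw⟩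
    exact ⟨kv, hkv, (p, lab), hmem, rfl, hsw⟩

-- ===== VERDICT (by name: the statement is the Claim_ definition above) =====
theorem infer_setonet_branch_head_type_spec : Claim_equal_infer_setonet_branch_head_type := by
  intro state_dict _
  unfold Spec_infer_setonet_branch_head_type infer_setonet_branch_head_type infer_setonet_branch_head_type_alt
  simp only [contains_seen_eq_any state_dict "adaptive_quadrature_head." "adaptive_quadrature" (by decide) (by decide),
      contains_seen_eq_any state_dict "quadrature_head." "quadrature" (by decide) (by decide),
      contains_seen_eq_any state_dict "galerkin_head." "galerkin_pou" (by decide) (by decide),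
      contains_seen_eq_any state_dict "pg_head." "petrov_attention" (by decide) (by decide)]
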